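-- pv_equiv track=rewrite | github.com/hommayushi3/nonograms | nonogram.py | count_col
-- ===== SOURCE A (Python) =====
-- def count_col(col, grid, n):
-- 	col_counts_array = []
-- 	consecutive_count = 0
-- 	for row in range(n):
-- 		if grid[row][col] == 1:
-- 			consecutive_count += 1
-- 		elif consecutive_count > 0:
-- 			col_counts_array.append(consecutive_count)
-- 			consecutive_count = 0
-- 	if consecutive_count > 0:
-- 		col_counts_array.append(consecutive_count)
-- 	return col_counts_array
-- ===== SOURCE B (Python) =====
-- def count_col(col, grid, n):
--     cells = [grid[row][col] == 1 for row in range(n)]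
--     starts = [i for i in range(n) if cells[i] and (i == 0 or not cells[i - 1])]
--     ends = [i for i in range(n) if cells[i] and (i == n - 1 or not cells[i + 1])]
--     return [e - s + 1 for s, e in zip(starts, ends)]
-- ===== Notes on version B (the rewrite author's own statement) =====
-- stated objective: alternative
-- what changed: Instead of a running counter flushed on each non-1 cell, B extracts the column, marks run-start and run-end positions with two declarative boundary tests, and pairs them with zip to get each run length as end - start + 1.
import Mathlib
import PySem

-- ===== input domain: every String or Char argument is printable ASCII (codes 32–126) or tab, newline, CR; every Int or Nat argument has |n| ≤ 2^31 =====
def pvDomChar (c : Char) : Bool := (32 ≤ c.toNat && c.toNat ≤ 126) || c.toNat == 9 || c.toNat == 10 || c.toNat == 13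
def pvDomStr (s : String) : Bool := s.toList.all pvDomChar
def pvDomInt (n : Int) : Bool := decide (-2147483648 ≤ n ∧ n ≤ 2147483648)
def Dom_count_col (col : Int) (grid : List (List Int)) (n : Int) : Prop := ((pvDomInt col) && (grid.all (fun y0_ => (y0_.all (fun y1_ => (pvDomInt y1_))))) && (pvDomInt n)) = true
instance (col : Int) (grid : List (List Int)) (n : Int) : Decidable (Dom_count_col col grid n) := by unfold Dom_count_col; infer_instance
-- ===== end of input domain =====

-- B replaces A's running-counter-with-flush loop by marking run-start and run-end positions in the column and pairing them (alternative decomposition, same cost).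

-- ===== PORT A =====
-- A: running counter over range(n), flushing the count on any non-1 cell and once at the end.
def count_col (col : Int) (grid : List (List Int)) (n : Int) : List Int :=
  let st := (PySem.List.pyRange 0 n 1).foldl
    (fun (st : List Int × Int) row =>
      if PySem.List.pyGetD (PySem.List.pyGetD grid row []) col 0 = 1 then (st.1, st.2 + 1)
      else if st.2 > 0 then (st.1 ++ [st.2], 0) else st)
    ([], 0)
  if st.2 > 0 then st.1 ++ [st.2] else st.1

-- ===== PORT B =====
-- B: extract the column as booleans, list the positions where a run starts and where a run ends, and pair them: each run length is end - start + 1.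
def count_col_alt (col : Int) (grid : List (List Int)) (n : Int) : List Int :=
  let cells : List Bool := (PySem.List.pyRange 0 n 1).map
    (fun row => PySem.List.pyGetD (PySem.List.pyGetD grid row []) col 0 == 1)
  let starts := (PySem.List.pyRange 0 n 1).filter
    (fun i => PySem.List.pyGetD cells i false && ((i == 0) || !(PySem.List.pyGetD cells (i - 1) false)))
  let ends := (PySem.List.pyRange 0 n 1).filter
    (fun i => PySem.List.pyGetD cells i false && ((i == n - 1) || !(PySem.List.pyGetD cells (i + 1) false)))
  List.zipWith (fun s e => e - s + 1) starts ends

-- ===== PRECONDITION & SPEC =====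
-- Pre_: every cell the loop reads exists (n within the number of rows, col a valid Python index of each visited row); outside it Python raises IndexError.
def Pre_count_col (col : Int) (grid : List (List Int)) (n : Int) : Prop :=
  n ≤ grid.length ∧ ∀ row ∈ grid.take n.toNat, PySem.Raise.InRange row.length col
instance (col : Int) (grid : List (List Int)) (n : Int) : Decidable (Pre_count_col col grid n) := by unfold Pre_count_col; infer_instance

def pvWitness_count_col : Int × List (List Int) × Int := (0, [[1], [0], [1]], 3)

def Spec_count_col (col : Int) (grid : List (List Int)) (n : Int) (out : List Int) : Prop := out = count_col_alt col grid n
instance (col : Int) (grid : List (List Int)) (n : Int) (out : List Int) : Decidable (Spec_count_col col grid n out) := by unfold Spec_count_col; infer_instance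

-- ===== CLAIM (what is proved, stated in full; the proofs are below) =====
def Claim_equal_count_col : Prop := ∀ (col : Int) (grid : List (List Int)) (n : Int), Dom_count_col col grid n → Pre_count_col col grid n → Spec_count_col col grid n (count_col col grid n)

-- ===== LEMMAS AND PROOFS =====

-- A's loop, abstracted: counter recursion over the column values.
def pvRun : Int → List Int → List Int
  | c, [] => if c > 0 then [c] else []
  | c, x :: xs => if x = 1 then pvRun (c + 1) xs else (if c > 0 then [c] else []) ++ pvRun 0 xs

-- Counter recursion over the boolean column.
def pvRunI : Int → List Bool → List Int
  | c, [] => if c > 0 then [c] else []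
  | c, b :: bs => if b then pvRunI (c + 1) bs else (if c > 0 then [c] else []) ++ pvRunI 0 bs

-- B's start positions, recursively: prev is the cell just before the suffix.
def startsFrom : Int → Bool → List Bool → List Int
  | _, _, [] => []
  | off, prev, b :: bs => (if b && !prev then [off] else []) ++ startsFrom (off + 1) b bs

-- head of a boolean list, false if empty
def headB : List Bool → Bool
  | [] => false
  | c :: _ => c

-- B's end positions, recursively (looks one cell ahead).
def endsFrom : Int → List Bool → List Int
  | _, [] => []
  | off, b :: bs => (if b && !(headB bs) then [off] else []) ++ endsFrom (off + 1) bs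

theorem pvFold_eq_pvRun (f : Int → Int) (xs : List Int) (acc : List Int) (c : Int) (hc : 0 ≤ c) :
    (if ((xs.foldl
        (fun (st : List Int × Int) row =>
          if f row = 1 then (st.1, st.2 + 1)
          else if st.2 > 0 then (st.1 ++ [st.2], 0) else st)
        (acc, c))).2 > 0
      then ((xs.foldl
        (fun (st : List Int × Int) row =>
          if f row = 1 then (st.1, st.2 + 1)
          else if st.2 > 0 then (st.1 ++ [st.2], 0) else st)
        (acc, c))).1 ++ [((xs.foldl
        (fun (st : List Int × Int) row =>
          if f row = 1 then (st.1, st.2 + 1)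
          else if st.2 > 0 then (st.1 ++ [st.2], 0) else st)
        (acc, c))).2]
      else ((xs.foldl
        (fun (st : List Int × Int) row =>
          if f row = 1 then (st.1, st.2 + 1)
          else if st.2 > 0 then (st.1 ++ [st.2], 0) else st)
        (acc, c))).1)
    = acc ++ pvRun c (xs.map f) := by
  induction xs generalizing acc c with
  | nil =>
    simp only [List.foldl_nil, List.map_nil, pvRun]
    split_ifs <;> simp
  | cons x xs ih =>
    simp only [List.foldl_cons, List.map_cons, pvRun]
    by_cases h1 : f x = 1
    · rw [if_pos h1]
      simpa [h1] using ih acc (c + 1) (by omega)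
    · rw [if_neg h1]
      by_cases h2 : c > 0
      · simpa [h1, h2, List.append_assoc] using ih (acc ++ [c]) 0 le_rfl
      · have hc0 : c = 0 := by omega
        subst hc0
        simpa [h1] using ih acc 0 le_rfl

theorem pvRun_eq_pvRunI (xs : List Int) (c : Int) :
    pvRun c xs = pvRunI c (xs.map (fun x => x == 1)) := by
  induction xs generalizing c with
  | nil => simp [pvRun, pvRunI]
  | cons x xs ih =>
    by_cases h : x = 1 <;> simp [pvRun, pvRunI, h, ih]

-- evaluating an index into cells = pre ++ b :: bs at position pre.length
theorem pvGetD_mid (pre : List Bool) (b : Bool) (bs : List Bool) :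
    PySem.List.pyGetD (pre ++ b :: bs) (pre.length : Int) false = b := by
  rw [PySem.List.pyGetD_natCast]
  simp [List.getD_eq_getElem?_getD]

theorem starts_filter (cells : List Bool) : ∀ (suf pre : List Bool), cells = pre ++ suf →
    (PySem.List.pyRange (pre.length : Int) (cells.length : Int) 1).filter
      (fun i => PySem.List.pyGetD cells i false &&
        ((i == 0) || !(PySem.List.pyGetD cells (i - 1) false)))
    = startsFrom (pre.length : Int) (pre.getLastD false) suf := by
  intro suf
  induction suf with
  | nil =>
    intro pre h
    have : (cells.length : Int) ≤ (pre.length : Int) := by simp [h]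
    rw [PySem.List.pyRange_one_eq_nil this]
    simp [startsFrom]
  | cons b bs ih =>
    intro pre h
    have hlt : (pre.length : Int) < (cells.length : Int) := by
      have : cells.length = pre.length + (bs.length + 1) := by simp [h]
      omega
    rw [PySem.List.pyRange_one_cons hlt, List.filter_cons]
    have hb : PySem.List.pyGetD cells (pre.length : Int) false = b := h ▸ pvGetD_mid pre b bs
    have hrec : (PySem.List.pyRange ((pre.length : Int) + 1) (cells.length : Int) 1).filter
        (fun i => PySem.List.pyGetD cells i false &&
          ((i == 0) || !(PySem.List.pyGetD cells (i - 1) false)))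
        = startsFrom ((pre.length : Int) + 1) ((pre ++ [b]).getLastD false) bs := by
      have := ih (pre ++ [b]) (by simp [h])
      simpa using this
    rw [List.getLastD_concat] at hrec
    have hprev : (((pre.length : Int) == 0) || !(PySem.List.pyGetD cells ((pre.length : Int) - 1) false))
        = !(pre.getLastD false) := by
      rcases List.eq_nil_or_concat pre with hpre | ⟨q, p, hpre⟩
      · subst hpre; simp
      · subst hpre
        simp only [List.concat_eq_append] at h ⊢
        have hk0 : (((q ++ [p]).length : Int) == 0) = false := by
          simp <;> omega
        have h1 : (((q ++ [p]).length : Int)) - 1 = (q.length : Int) := by simp <;> omega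
        have h2 : cells = q ++ p :: (b :: bs) := by simp [h]
        have h3 := pvGetD_mid q p (b :: bs)
        rw [← h2] at h3
        rw [hk0, h1, h3, List.getLastD_concat]
        simp
    rw [hb, hprev, hrec]
    simp only [startsFrom]
    cases hbp : (b && !(pre.getLastD false)) <;> simp

theorem ends_filter (cells : List Bool) : ∀ (suf pre : List Bool), cells = pre ++ suf →
    (PySem.List.pyRange (pre.length : Int) (cells.length : Int) 1).filter
      (fun i => PySem.List.pyGetD cells i false &&
        ((i == (cells.length : Int) - 1) || !(PySem.List.pyGetD cells (i + 1) false)))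
    = endsFrom (pre.length : Int) suf := by
  intro suf
  induction suf with
  | nil =>
    intro pre h
    have : (cells.length : Int) ≤ (pre.length : Int) := by simp [h]
    rw [PySem.List.pyRange_one_eq_nil this]
    simp [endsFrom]
  | cons b bs ih =>
    intro pre h
    have hlen : cells.length = pre.length + bs.length + 1 := by simp [h]; try omega
    have hlt : (pre.length : Int) < (cells.length : Int) := by omega
    rw [PySem.List.pyRange_one_cons hlt, List.filter_cons]
    have hb : PySem.List.pyGetD cells (pre.length : Int) false = b := h ▸ pvGetD_mid pre b bs
    have hrec : (PySem.List.pyRange ((pre.length : Int) + 1) (cells.length : Int) 1).filter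
        (fun i => PySem.List.pyGetD cells i false &&
          ((i == (cells.length : Int) - 1) || !(PySem.List.pyGetD cells (i + 1) false)))
        = endsFrom ((pre.length : Int) + 1) bs := by
      have := ih (pre ++ [b]) (by simp [h])
      simpa using this
    have hnext : (((pre.length : Int) == (cells.length : Int) - 1)
        || !(PySem.List.pyGetD cells ((pre.length : Int) + 1) false)) = !(headB bs) := by
      cases bs with
      | nil =>
        have : (((pre.length : Int)) == (cells.length : Int) - 1) = true := by
          simp only [List.length_nil] at hlen
          simp [beq_iff_eq]
          omega
        rw [this]; simp [headB]
      | cons c bs' =>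
        have hne : (((pre.length : Int)) == (cells.length : Int) - 1) = false := by
          simp only [List.length_cons] at hlen
          simp [beq_iff_eq]
          omega
        have h1 : ((pre.length : Int)) + 1 = (((pre ++ [b]).length : Int)) := by simp
        have h2 : cells = (pre ++ [b]) ++ c :: bs' := by simp [h]
        have h3 := pvGetD_mid (pre ++ [b]) c bs'
        rw [← h2] at h3
        rw [hne, h1, h3]
        simp [headB]
    rw [hb, hnext, hrec]
    simp only [endsFrom]
    cases hbp : (b && !(headB bs)) <;> simp

theorem headB_nil : headB [] = false := rfl
theorem headB_cons (c : Bool) (bs : List Bool) : headB (c :: bs) = c := rfl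

theorem zip_runs (bs : List Bool) :
    (∀ off : Int, List.zipWith (fun s e => e - s + 1) (startsFrom off false bs) (endsFrom off bs) = pvRunI 0 bs)
    ∧ (∀ off s c : Int, c = off - s → 1 ≤ c →
        List.zipWith (fun s e => e - s + 1) (s :: startsFrom off true bs)
          ((if headB bs then ([] : List Int) else [off - 1]) ++ endsFrom off bs) = pvRunI c bs) := by
  induction bs with
  | nil =>
    constructor
    · intro off
      simp [startsFrom, endsFrom, pvRunI]
    · intro off s c hc h1
      have hpos : c > 0 := by omega
      simp only [startsFrom, endsFrom, headB_nil, pvRunI, if_pos hpos, Bool.false_eq_true,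
        if_false, List.append_nil, List.zipWith_cons_cons, List.zipWith_nil_right]
      simp only [List.cons.injEq, and_true]
      omega
  | cons b bs ih =>
    obtain ⟨ihL, ihM⟩ := ih
    constructor
    · intro off
      cases b with
      | false =>
        simp only [startsFrom, endsFrom, pvRunI, headB_cons, Bool.false_and, Bool.false_eq_true,
          if_false, List.nil_append]
        simpa using ihL (off + 1)
      | true =>
        have key := ihM (off + 1) off 1 (by omega) (by omega)
        have e : off + 1 - 1 = off := by omega
        rw [e] at key
        simp only [startsFrom, endsFrom, pvRunI, Bool.true_and, Bool.not_false, if_true,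
          List.singleton_append]
        cases hcase : headB bs with
        | false => rw [hcase] at key; simpa [hcase] using key
        | true => rw [hcase] at key; simpa [hcase] using key
    · intro off s c hc h1
      cases b with
      | true =>
        have key := ihM (off + 1) s (c + 1) (by omega) (by omega)
        have e : off + 1 - 1 = off := by omega
        rw [e] at key
        simp only [startsFrom, endsFrom, pvRunI, headB_cons, Bool.true_and, Bool.not_true,
          Bool.true_eq_false, if_false, if_true, List.nil_append]
        cases hcase : headB bs with
        | false => rw [hcase] at key; simpa [hcase] using key
        | true => rw [hcase] at key; simpa [hcase] using key
      | false =>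
        have hL := ihL (off + 1)
        have hpos : c > 0 := by omega
        simp only [startsFrom, endsFrom, pvRunI, headB_cons, Bool.false_and, Bool.and_true,
          Bool.false_eq_true, if_false, if_true, if_pos hpos, List.nil_append,
          List.singleton_append, List.zipWith_cons_cons]
        refine List.cons_eq_cons.mpr ⟨by omega, hL⟩

-- ===== VERDICT (by name: the statement is the Claim_ definition above) =====
theorem count_col_spec : Claim_equal_count_col := by
  intro col grid n _ _
  show count_col col grid n = count_col_alt col grid n
  simp only [count_col, count_col_alt]
  by_cases hn : n ≤ 0
  · rw [PySem.List.pyRange_one_eq_nil hn]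
    simp
  · set cs : List Bool := (PySem.List.pyRange 0 n 1).map
      (fun row => PySem.List.pyGetD (PySem.List.pyGetD grid row []) col 0 == 1) with hcs
    rw [pvFold_eq_pvRun (fun row => PySem.List.pyGetD (PySem.List.pyGetD grid row []) col 0)
      (PySem.List.pyRange 0 n 1) [] 0 le_rfl, List.nil_append, pvRun_eq_pvRunI, List.map_map]
    have hcseq : (PySem.List.pyRange 0 n 1).map
        ((fun x => x == 1) ∘ (fun row => PySem.List.pyGetD (PySem.List.pyGetD grid row []) col 0))
        = cs := by rw [hcs]; rfl
    rw [hcseq]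
    have hlen : ((cs.length : Int)) = n := by
      rw [hcs]
      simp [PySem.List.length_pyRange_one]
      omega
    have hrange : PySem.List.pyRange 0 n 1
        = PySem.List.pyRange ((([] : List Bool).length : Int)) ((cs.length : Int)) 1 := by
      rw [hlen]; simp
    rw [hrange, ← hlen, starts_filter cs cs [] (by simp), ends_filter cs cs [] (by simp)]
    simp only [List.length_nil, Nat.cast_zero, List.getLastD_nil]
    exact ((zip_runs cs).1 0).symm
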